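-- pv_equiv track=rewrite | github.com/HakonDahle/NeuralDAtaProject | RasterPlot.py | electrode_list
-- ===== SOURCE A (Python) =====
-- def electrode_list(activeElectrodes,time):    # Returns a list of timestamps organized for each electrode
--     temp_array = []
--     temp_electrode = []
--     for electrodenr in range(0,60):
--         for element in range(len(activeElectrodes)):
--             spike = activeElectrodes[element]  # The spiked electrode
--
--             if electrodenr == spike:
--                 temp_electrode.insert(len(temp_electrode),time[element])   # Inserts the timestamp into the column for the electrode
--         temp_array.append(temp_electrode[:])    # Adds the electrode column at the end of the list
--         temp_electrode.clear()  # Clears the temporary electrode to make it ready for the next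
--
--     return temp_array
-- ===== SOURCE B (Python) =====
-- def electrode_list(activeElectrodes, time):    # Returns a list of timestamps organized for each electrode
--     buckets = [[] for _ in range(60)]
--     for spike, t in zip(activeElectrodes, time):
--         if 0 <= spike < 60:
--             buckets[spike].append(t)
--     return buckets
-- ===== Notes on version B (the rewrite author's own statement) =====
-- stated objective: faster
-- what changed: A scans the whole activeElectrodes list once per electrode (60 full passes, appending matches); B makes a single pass over zip(activeElectrodes, time), bucketing each timestamp into one of 60 pre-allocated lists indexed by the electrode number.
import Mathlib
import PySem

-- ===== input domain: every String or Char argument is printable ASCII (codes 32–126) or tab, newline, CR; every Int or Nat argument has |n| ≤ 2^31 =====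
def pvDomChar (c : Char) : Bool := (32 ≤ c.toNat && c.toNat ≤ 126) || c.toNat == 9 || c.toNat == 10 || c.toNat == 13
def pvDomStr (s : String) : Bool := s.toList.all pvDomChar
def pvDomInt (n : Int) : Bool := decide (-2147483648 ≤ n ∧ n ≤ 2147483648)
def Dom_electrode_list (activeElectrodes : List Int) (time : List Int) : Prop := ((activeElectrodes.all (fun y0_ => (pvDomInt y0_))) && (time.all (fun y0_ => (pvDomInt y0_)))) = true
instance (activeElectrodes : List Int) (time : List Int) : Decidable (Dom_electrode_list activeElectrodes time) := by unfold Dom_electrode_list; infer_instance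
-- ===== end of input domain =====

-- B replaces A's 60 full scans of activeElectrodes by one pass that buckets each
-- timestamp into a pre-allocated list indexed by its electrode number (objective: faster, constant factor).

-- ===== PORT A =====
def electrode_list (activeElectrodes : List Int) (time : List Int) : List (List Int) :=
  ((PySem.List.pyRange 0 60 1).foldl
    (fun (st : List (List Int) × List Int) (electrodenr : Int) =>
      (st.1 ++ [(PySem.List.pyRange 0 (activeElectrodes.length : Int) 1).foldl
          (fun (te : List Int) (element : Int) =>
            if electrodenr = PySem.List.pyGetD activeElectrodes element 0 then
              te ++ [PySem.List.pyGetD time element 0]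
            else te)
          st.2], ([] : List Int)))
    (([] : List (List Int)), ([] : List Int))).1

-- ===== PORT B =====
def electrode_list_alt (activeElectrodes : List Int) (time : List Int) : List (List Int) :=
  (activeElectrodes.zip time).foldl
    (fun (buckets : List (List Int)) (p : Int × Int) =>
      if 0 ≤ p.1 ∧ p.1 < 60 then buckets.modify p.1.toNat (fun b => b ++ [p.2]) else buckets)
    (List.replicate 60 ([] : List Int))

-- ===== PRECONDITION & SPEC =====
-- Pre_ excludes exactly the inputs where A raises IndexError: an electrode in 0..59 at a
-- position with no corresponding timestamp (time[element] out of range).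
def Pre_electrode_list (activeElectrodes : List Int) (time : List Int) : Prop :=
  ∀ i : Nat, i < activeElectrodes.length →
    (0 ≤ activeElectrodes.getD i 0 ∧ activeElectrodes.getD i 0 < 60) → i < time.length
instance (activeElectrodes : List Int) (time : List Int) : Decidable (Pre_electrode_list activeElectrodes time) := by
  unfold Pre_electrode_list; infer_instance

def pvWitness_electrode_list : List Int × List Int := ([1, 2, 1, 70, -3], [10, 20, 30, 40, 50])

def Spec_electrode_list (activeElectrodes : List Int) (time : List Int) (out : List (List Int)) : Prop := out = electrode_list_alt activeElectrodes time
instance (activeElectrodes : List Int) (time : List Int) (out : List (List Int)) : Decidable (Spec_electrode_list activeElectrodes time out) := by unfold Spec_electrode_list; infer_instance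

-- ===== CLAIM (what is proved, stated in full; the proofs are below) =====
def Claim_equal_electrode_list : Prop := ∀ (activeElectrodes : List Int) (time : List Int), Dom_electrode_list activeElectrodes time → Pre_electrode_list activeElectrodes time → Spec_electrode_list activeElectrodes time (electrode_list activeElectrodes time)

-- ===== LEMMAS AND PROOFS =====

-- A's outer loop: each iteration appends one finished column and resets the scratch list.
lemma pv_outer_shape (l : List Int) (g : Int → List Int → List Int) (acc : List (List Int)) :
    (l.foldl (fun (st : List (List Int) × List Int) e => (st.1 ++ [g e st.2], ([] : List Int)))
      (acc, ([] : List Int))).1 = acc ++ l.map (fun e => g e []) := by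
  induction l generalizing acc with
  | nil => simp
  | cons a l ih => simp [List.foldl_cons, ih]

-- A's inner scan for one electrode k equals the per-k fold over the zipped pairs.
lemma pv_inner_zip : ∀ (ae time : List Int) (k : Int) (acc : List Int),
    0 ≤ k → k < 60 →
    (∀ i : Nat, i < ae.length → (0 ≤ ae.getD i 0 ∧ ae.getD i 0 < 60) → i < time.length) →
    (List.range ae.length).foldl
      (fun te i => if k = ae.getD i 0 then te ++ [time.getD i 0] else te) acc
    = (ae.zip time).foldl (fun te p => if k = p.1 then te ++ [p.2] else te) acc := by
  intro ae
  induction ae with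
  | nil => intro time k acc _ _ _; simp
  | cons a ae ih =>
    intro time k acc hk0 hk60 hpre
    simp only [List.length_cons]
    rw [List.range_succ_eq_map, List.foldl_cons, List.foldl_map]
    simp only [List.getD_cons_zero, List.getD_cons_succ]
    cases time with
    | nil =>
      have h0 := hpre 0 (by simp)
      simp only [List.getD_cons_zero, List.length_nil] at h0
      have hka : ¬ (k = a) := by intro h; subst h; omega
      rw [if_neg hka]
      have := ih [] k acc hk0 hk60 (by
        intro i hi hc
        have := hpre (i + 1) (by simp; omega) (by simpa using hc)
        omega)
      simp only [List.foldl_nil, List.zip_nil_right] at this ⊢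
      calc (List.range ae.length).foldl
            (fun te i => if k = ae.getD i 0 then te ++ [List.getD [] (i+1) 0] else te) acc
          = (List.range ae.length).foldl
            (fun te i => if k = ae.getD i 0 then te ++ [List.getD ([] : List Int) i 0] else te) acc := by
            simp
        _ = acc := this
    | cons t ts =>
      simp only [List.getD_cons_zero, List.getD_cons_succ, List.zip_cons_cons, List.foldl_cons]
      exact ih ts k _ hk0 hk60 (by
        intro i hi hc
        have := hpre (i + 1) (by simp; omega) (by simpa using hc)
        simp only [List.length_cons] at this ⊢
        omega)

-- B's bucket fold, seen bucket-by-bucket.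
lemma pv_bfold_map : ∀ (l : List (Int × Int)) (bs : List (List Int)), bs.length = 60 →
    l.foldl (fun (buckets : List (List Int)) (p : Int × Int) =>
        if 0 ≤ p.1 ∧ p.1 < 60 then buckets.modify p.1.toNat (fun b => b ++ [p.2]) else buckets) bs
    = (List.range 60).map
        (fun (j : Nat) => l.foldl (fun te p => if (j : Int) = p.1 then te ++ [p.2] else te) (bs.getD j [])) := by
  intro l
  induction l with
  | nil =>
    intro bs hbs
    apply List.ext_getElem
    · simp [hbs]
    · intro i h1 h2
      simp only [List.getElem_map, List.getElem_range, List.foldl_nil]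
      rw [List.getD_eq_getElem _ _ (by simp at h2; omega)]
  | cons p l ih =>
    intro bs hbs
    by_cases hc : 0 ≤ p.1 ∧ p.1 < 60
    · rw [List.foldl_cons, if_pos hc, ih _ (by simp [hbs])]
      apply List.map_congr_left
      intro j hj
      rw [List.mem_range] at hj
      rw [List.foldl_cons]
      congr 1
      have hjlt : j < bs.length := by omega
      by_cases hje : (j : Int) = p.1
      · have hjt : p.1.toNat = j := by omega
        rw [if_pos hje, List.getD_eq_getElem _ _ (by simp [List.length_modify]; omega),
          List.getElem_modify, if_pos hjt, List.getD_eq_getElem _ _ hjlt]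
      · have hjt : ¬ (p.1.toNat = j) := by omega
        rw [if_neg hje, List.getD_eq_getElem _ _ (by simp [List.length_modify]; omega),
          List.getElem_modify, if_neg hjt, List.getD_eq_getElem _ _ hjlt]
    · rw [List.foldl_cons, if_neg hc, ih _ hbs]
      apply List.map_congr_left
      intro j hj
      rw [List.mem_range] at hj
      rw [List.foldl_cons, if_neg (by intro h; apply hc; constructor <;> omega)]

lemma pv_pyRange60_map (F : Int → List Int) :
    (PySem.List.pyRange 0 60 1).map F = (List.range 60).map (fun j => F (Int.ofNat j)) := by
  rw [show PySem.List.pyRange 0 60 1 = List.map (fun k : Nat => Int.ofNat k) (List.range 60) from by decide,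
    List.map_map]
  rfl

-- ===== VERDICT (by name: the statement is the Claim_ definition above) =====
theorem electrode_list_spec : Claim_equal_electrode_list := by
  intro ae time _ hpre
  unfold Spec_electrode_list electrode_list electrode_list_alt
  rw [pv_outer_shape _
    (fun e te => (PySem.List.pyRange 0 (ae.length : Int) 1).foldl
      (fun (te : List Int) (element : Int) =>
        if e = PySem.List.pyGetD ae element 0 then te ++ [PySem.List.pyGetD time element 0] else te) te) []]
  rw [pv_bfold_map _ _ (by simp)]
  rw [pv_pyRange60_map, List.nil_append]
  apply List.map_congr_left
  intro j hj
  rw [List.mem_range] at hj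
  simp only [Int.ofNat_eq_natCast]
  rw [PySem.List.pyRange_zero_natCast, List.foldl_map]
  simp only [PySem.List.pyGetD_natCast]
  rw [pv_inner_zip ae time (j : Int) [] (by omega) (by exact_mod_cast hj) hpre]
  congr 1
  have hjl : j < (List.replicate 60 ([] : List Int)).length := by simp [hj]
  rw [List.getD_eq_getElem _ _ hjl, List.getElem_replicate]
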